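-- pv_equiv track=rewrite | github.com/lijianqiao/ncm | backend/app/services/topology_service.py | _parse_lldp_result
-- ===== SOURCE A (Python) =====
-- from typing import Any
--
-- def _parse_lldp_result(lldp_data: dict[str, Any]) -> list[dict]:
--     """
--     解析 LLDP 采集结果。
--
--     Args:
--         lldp_data: LLDP 原始数据 (TextFSM 解析后)
--
--     Returns:
--         邻居列表
--     """
--     neighbors: list[dict] = []
--
--     # 处理解析后的数据
--     parsed = lldp_data.get("parsed")
--     if not parsed:
--         return neighbors
--
--     if isinstance(parsed, list):
--         for entry in parsed:
--             # TextFSM 解析后字段名为小写，优先使用小写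
--             neighbor = {
--                 "local_interface": entry.get("local_interface") or entry.get("LOCAL_INTERFACE", ""),
--                 "neighbor_interface": entry.get("neighbor_port_id")
--                 or entry.get("neighbor_interface")
--                 or entry.get("NEIGHBOR_PORT_ID", ""),
--                 "neighbor_hostname": entry.get("neighbor_name")
--                 or entry.get("neighbor")
--                 or entry.get("NEIGHBOR_NAME", ""),
--                 "neighbor_ip": entry.get("management_ip") or entry.get("MANAGEMENT_IP", ""),
--                 "neighbor_description": entry.get("neighbor_description") or entry.get("SYSTEM_DESCRIPTION", ""),
--                 "chassis_id": entry.get("chassis_id") or entry.get("CHASSIS_ID", ""),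
--             }
--             neighbors.append(neighbor)
--
--     return neighbors
-- ===== SOURCE B (Python) =====
-- # B: inverted index — one pass over each entry's own items with a reverse
-- # source-key -> (field, priority) map, keeping the lowest-priority truthy value
-- # per field; A instead probes candidate keys per field with or-chains.
-- REV = {
--     "local_interface": ("local_interface", 0),
--     "LOCAL_INTERFACE": ("local_interface", 1),
--     "neighbor_port_id": ("neighbor_interface", 0),
--     "neighbor_interface": ("neighbor_interface", 1),
--     "NEIGHBOR_PORT_ID": ("neighbor_interface", 2),
--     "neighbor_name": ("neighbor_hostname", 0),
--     "neighbor": ("neighbor_hostname", 1),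
--     "NEIGHBOR_NAME": ("neighbor_hostname", 2),
--     "management_ip": ("neighbor_ip", 0),
--     "MANAGEMENT_IP": ("neighbor_ip", 1),
--     "neighbor_description": ("neighbor_description", 0),
--     "SYSTEM_DESCRIPTION": ("neighbor_description", 1),
--     "chassis_id": ("chassis_id", 0),
--     "CHASSIS_ID": ("chassis_id", 1),
-- }
--
-- FIELDS = [
--     "local_interface",
--     "neighbor_interface",
--     "neighbor_hostname",
--     "neighbor_ip",
--     "neighbor_description",
--     "chassis_id",
-- ]
--
--
-- def _parse_lldp_result(lldp_data):
--     parsed = lldp_data.get("parsed")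
--     if not parsed or not isinstance(parsed, list):
--         return []
--     out = []
--     for entry in parsed:
--         best = {}
--         for k, v in entry.items():
--             tgt = REV.get(k)
--             if tgt and v:
--                 field, prio = tgt
--                 if field not in best or prio < best[field][0]:
--                     best[field] = (prio, v)
--         out.append({f: best[f][1] if f in best else "" for f in FIELDS})
--     return out
-- ===== Notes on version B (the rewrite author's own statement) =====
-- stated objective: alternative
-- what changed: Replaced A's six per-field or-chains of candidate-key lookups by an inverted index: one pass over each entry's own items with a reverse key->(field,priority) map, keeping the lowest-priority truthy value per field.
import Mathlib
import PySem

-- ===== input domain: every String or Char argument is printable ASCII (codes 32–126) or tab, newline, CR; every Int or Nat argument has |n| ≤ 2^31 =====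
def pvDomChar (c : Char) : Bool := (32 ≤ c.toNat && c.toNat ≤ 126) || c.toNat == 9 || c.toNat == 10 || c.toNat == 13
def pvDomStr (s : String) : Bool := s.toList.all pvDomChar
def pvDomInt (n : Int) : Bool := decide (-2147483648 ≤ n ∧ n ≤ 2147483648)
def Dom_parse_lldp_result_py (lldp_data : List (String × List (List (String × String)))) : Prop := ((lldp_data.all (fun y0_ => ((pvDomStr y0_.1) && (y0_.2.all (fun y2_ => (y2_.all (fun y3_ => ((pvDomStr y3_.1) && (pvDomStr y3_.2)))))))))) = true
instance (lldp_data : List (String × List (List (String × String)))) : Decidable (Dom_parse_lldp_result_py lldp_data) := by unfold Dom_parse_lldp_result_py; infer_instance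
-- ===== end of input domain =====

-- B replaces A's six per-field or-chains by an inverted index (one pass over each entry's
-- items with a reverse key->(field,priority) map, lowest-priority truthy value wins);
-- return values proved equal (alternative, not faster).

-- ===== PORT A =====
-- Python `a or b` where a is entry.get(k): a's value if truthy (some nonempty string), else b.
def pvOr (a : Option String) (b : String) : String :=
  match a with
  | some s => if s = "" then b else s
  | none => b

def pvEntryA (e : List (String × String)) : List (String × String) :=
  let d := PySem.Dict.mk e
  [("local_interface", pvOr (d.get? "local_interface") (d.getD "LOCAL_INTERFACE" "")),
   ("neighbor_interface", pvOr (d.get? "neighbor_port_id")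
      (pvOr (d.get? "neighbor_interface") (d.getD "NEIGHBOR_PORT_ID" ""))),
   ("neighbor_hostname", pvOr (d.get? "neighbor_name")
      (pvOr (d.get? "neighbor") (d.getD "NEIGHBOR_NAME" ""))),
   ("neighbor_ip", pvOr (d.get? "management_ip") (d.getD "MANAGEMENT_IP" "")),
   ("neighbor_description", pvOr (d.get? "neighbor_description") (d.getD "SYSTEM_DESCRIPTION" "")),
   ("chassis_id", pvOr (d.get? "chassis_id") (d.getD "CHASSIS_ID" ""))]

def parse_lldp_result_py (lldp_data : List (String × List (List (String × String)))) : List (List (String × String)) :=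
  match (PySem.Dict.mk lldp_data).get? "parsed" with
  | none => []
  | some parsed =>
      if parsed = [] then []  -- `if not parsed: return neighbors`
      else parsed.foldl (fun neighbors e => neighbors ++ [pvEntryA e]) []

-- ===== PORT B =====
-- REV: reverse index source key -> (output field, priority)
def pvRevD : PySem.Dict String (String × Int) := PySem.Dict.mk
  [("local_interface", ("local_interface", 0)),
   ("LOCAL_INTERFACE", ("local_interface", 1)),
   ("neighbor_port_id", ("neighbor_interface", 0)),
   ("neighbor_interface", ("neighbor_interface", 1)),
   ("NEIGHBOR_PORT_ID", ("neighbor_interface", 2)),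
   ("neighbor_name", ("neighbor_hostname", 0)),
   ("neighbor", ("neighbor_hostname", 1)),
   ("NEIGHBOR_NAME", ("neighbor_hostname", 2)),
   ("management_ip", ("neighbor_ip", 0)),
   ("MANAGEMENT_IP", ("neighbor_ip", 1)),
   ("neighbor_description", ("neighbor_description", 0)),
   ("SYSTEM_DESCRIPTION", ("neighbor_description", 1)),
   ("chassis_id", ("chassis_id", 0)),
   ("CHASSIS_ID", ("chassis_id", 1))]

def pvFields : List String :=
  ["local_interface", "neighbor_interface", "neighbor_hostname",
   "neighbor_ip", "neighbor_description", "chassis_id"]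

-- Loop body of `for k, v in entry.items(): tgt = REV.get(k); if tgt and v: ...`
def pvStep (best : PySem.Dict String (Int × String)) (kv : String × String) :
    PySem.Dict String (Int × String) :=
  match pvRevD.get? kv.1 with
  | some fp =>
      if kv.2 ≠ "" then
        match best.get? fp.1 with
        | none => best.insert fp.1 (fp.2, kv.2)
        | some q => if fp.2 < q.1 then best.insert fp.1 (fp.2, kv.2) else best
      else best
  | none => best

-- entry.items() of the Python dict the association list stands for:
-- first occurrence of each key, with the dict's (first-match) value.
def pvItems (e : List (String × String)) : List (String × String) :=
  (PySem.List.dedup (e.map Prod.fst)).map (fun k => (k, (PySem.Dict.mk e).getD k ""))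

def pvEntryB (e : List (String × String)) : List (String × String) :=
  let best := (pvItems e).foldl pvStep PySem.Dict.empty
  pvFields.map (fun f => (f, match best.get? f with | some q => q.2 | none => ""))

def parse_lldp_result_py_alt (lldp_data : List (String × List (List (String × String)))) : List (List (String × String)) :=
  match (PySem.Dict.mk lldp_data).get? "parsed" with
  | none => []
  | some parsed =>
      if parsed = [] then []  -- `if not parsed or not isinstance(parsed, list)`
      else parsed.foldl (fun out e => out ++ [pvEntryB e]) []

-- ===== PRECONDITION & SPEC =====
def Spec_parse_lldp_result_py (lldp_data : List (String × List (List (String × String)))) (out : List (List (String × String))) : Prop := out = parse_lldp_result_py_alt lldp_data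
instance (lldp_data : List (String × List (List (String × String)))) (out : List (List (String × String))) : Decidable (Spec_parse_lldp_result_py lldp_data out) := by unfold Spec_parse_lldp_result_py; infer_instance

-- ===== CLAIM (what is proved, stated in full; the proofs are below) =====
def Claim_equal_parse_lldp_result_py : Prop := ∀ (lldp_data : List (String × List (List (String × String)))), Dom_parse_lldp_result_py lldp_data → Spec_parse_lldp_result_py lldp_data (parse_lldp_result_py lldp_data)

-- ===== LEMMAS AND PROOFS =====

-- pvUpd: the effect of one relevant item of priority p, value v, on one field's slot.
def pvUpd (o : Option (Int × String)) (p : Int) (v : String) : Option (Int × String) :=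
  match o with
  | none => some (p, v)
  | some q => if p < q.1 then some (p, v) else some q

-- pvStep projected onto one output field f (the slot best.get? f).
def pvHf (d : PySem.Dict String String) (f : String) (o : Option (Int × String)) (k : String) :
    Option (Int × String) :=
  match pvRevD.get? k with
  | some fp =>
      if d.getD k "" ≠ "" then (if fp.1 = f then pvUpd o fp.2 (d.getD k "") else o) else o
  | none => o

-- The same slot update written against an explicit candidate list cs (key, priority).
def pvHh (d : PySem.Dict String String) (cs : List (String × Int)) (o : Option (Int × String))
    (k : String) : Option (Int × String) :=
  match List.lookup k cs with
  | some p => if d.getD k "" ≠ "" then pvUpd o p (d.getD k "") else o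
  | none => o

-- First candidate of cs whose dict value is truthy, with its priority.
def pvFirst (d : PySem.Dict String String) : List (String × Int) → Option (Int × String)
  | [] => none
  | kp :: cs => if d.getD kp.1 "" ≠ "" then some (kp.2, d.getD kp.1 "") else pvFirst d cs

theorem pvStep_get (d : PySem.Dict String String) (best : PySem.Dict String (Int × String))
    (k f : String) :
    (pvStep best (k, d.getD k "")).get? f = pvHf d f (best.get? f) k := by
  cases hr : pvRevD.get? k with
  | none => simp [pvStep, pvHf, hr]
  | some fp =>
      rcases fp with ⟨f', p⟩
      by_cases hv : d.getD k "" ≠ ""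
      · by_cases hf : f' = f
        · subst hf
          cases hb : best.get? f' with
          | none => simp [pvStep, pvHf, hr, hv, hb, pvUpd, PySem.Dict.get?_insert_self]
          | some q =>
              by_cases hp : p < q.1 <;>
                simp [pvStep, pvHf, hr, hv, hb, hp, pvUpd, PySem.Dict.get?_insert_self]
        · have hne : f ≠ f' := fun h => hf h.symm
          cases hb : best.get? f' with
          | none => simp [pvStep, pvHf, hr, hv, hb, hf, PySem.Dict.get?_insert_of_ne _ _ hne]
          | some q =>
              by_cases hp : p < q.1 <;>
                simp [pvStep, pvHf, hr, hv, hb, hf, hp, PySem.Dict.get?_insert_of_ne _ _ hne]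
      · simp [pvStep, pvHf, hr, hv]

theorem foldl_pvStep_get (d : PySem.Dict String String) (keys : List String)
    (best : PySem.Dict String (Int × String)) (f : String) :
    ((keys.foldl (fun b k => pvStep b (k, d.getD k "")) best).get? f)
      = keys.foldl (pvHf d f) (best.get? f) := by
  induction keys generalizing best with
  | nil => rfl
  | cons k ks ih => simp only [List.foldl_cons, ih, pvStep_get]

-- invariant used below: the slot is empty, holds a priority strictly above p0,
-- or holds exactly the head candidate's (p0, v0)
def pvInv (p0 : Int) (v0 : String) (o : Option (Int × String)) : Prop :=
  o = none ∨ (∃ p v, o = some (p, v) ∧ p0 < p) ∨ o = some (p0, v0)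

-- A successful lookup's value is among the second components.
theorem pvLookup_mem_snd {k : String} {cs : List (String × Int)} {p : Int}
    (h : List.lookup k cs = some p) : p ∈ cs.map Prod.snd := by
  induction cs with
  | nil => simp [List.lookup] at h
  | cons kp tl ih =>
      rcases kp with ⟨a, b⟩
      by_cases hk : (k == a) = true
      · simp [List.lookup, hk] at h; simp [h]
      · simp [List.lookup, hk] at h
        exact List.mem_cons_of_mem _ (ih h)

-- lookup misses when the key is absent.
theorem pvLookup_eq_none {k : String} {cs : List (String × Int)}
    (h : k ∉ cs.map Prod.fst) : List.lookup k cs = none := by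
  induction cs with
  | nil => rfl
  | cons kp tl ih =>
      rcases kp with ⟨a, b⟩
      have hka : ¬ k = a := fun he => h (by simp [he])
      have htl : k ∉ tl.map Prod.fst := fun hm => h (by simp [List.map_cons, hm])
      simp [List.lookup, show (k == a) = false by simp [hka], ih htl]

theorem pvHh_inv (d : PySem.Dict String String) (k0 : String) (p0 : Int)
    (cs : List (String × Int)) (hp : ∀ p ∈ cs.map Prod.snd, p0 < p)
    (o : Option (Int × String)) (k : String)
    (h : pvInv p0 (d.getD k0 "") o) :
    pvInv p0 (d.getD k0 "") (pvHh d ((k0, p0) :: cs) o k) := by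
  unfold pvInv at h ⊢
  unfold pvHh
  rcases hl : List.lookup k ((k0, p0) :: cs) with _ | p
  · exact h
  · by_cases hv : d.getD k "" ≠ ""
    · simp only [if_pos hv]
      have hk : (k = k0 ∧ p = p0) ∨ List.lookup k cs = some p := by
        by_cases hkk : k = k0
        · simp only [List.lookup, show (k == k0) = true by simp [hkk]] at hl
          exact Or.inl ⟨hkk, (Option.some_inj.mp hl).symm⟩
        · simp only [List.lookup, show (k == k0) = false by simp [hkk]] at hl
          exact Or.inr hl
      rcases hk with ⟨hke, hpe⟩ | hmem
      · -- the head candidate itself: the slot becomes exactly (p0, v0)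
        subst hke; subst hpe
        rcases h with h | ⟨p', v', h, hlt⟩ | h <;> subst h
        · exact Or.inr (Or.inr rfl)
        · simp only [pvUpd, if_pos hlt]
          exact Or.inr (Or.inr trivial)
        · simp only [pvUpd, if_neg (lt_irrefl p)]
          exact Or.inr (Or.inr trivial)
      · -- a tail candidate: its priority is strictly above p0
        have hpp : p0 < p := hp p (pvLookup_mem_snd hmem)
        rcases h with h | ⟨p', v', h, hlt⟩ | h <;> subst h
        · exact Or.inr (Or.inl ⟨p, _, rfl, hpp⟩)
        · simp only [pvUpd]
          by_cases hc : p < p'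
          · simp only [if_pos hc]; exact Or.inr (Or.inl ⟨p, _, rfl, hpp⟩)
          · simp only [if_neg hc]; exact Or.inr (Or.inl ⟨p', v', rfl, hlt⟩)
        · have hnc : ¬ p < p0 := by omega
          simp only [pvUpd, if_neg hnc]
          exact Or.inr (Or.inr trivial)
    · simp only [if_neg hv]; exact h

-- Processing the head candidate's key from any invariant state pins the slot to (p0, v0).
theorem pvHh_head (d : PySem.Dict String String) (k0 : String) (p0 : Int)
    (cs : List (String × Int)) (t0 : d.getD k0 "" ≠ "")
    (o : Option (Int × String)) (h : pvInv p0 (d.getD k0 "") o) :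
    pvHh d ((k0, p0) :: cs) o k0 = some (p0, d.getD k0 "") := by
  unfold pvInv at h
  unfold pvHh
  simp only [List.lookup, beq_self_eq_true, if_pos t0]
  rcases h with h | ⟨p', v', h, hlt⟩ | h <;> subst h
  · rfl
  · simp only [pvUpd, if_pos hlt]
  · simp only [pvUpd, if_neg (lt_irrefl p0)]

-- Once the slot holds the head candidate, no later item changes it.
theorem pvHh_absorb (d : PySem.Dict String String) (k0 : String) (p0 : Int)
    (cs : List (String × Int)) (hp : ∀ p ∈ cs.map Prod.snd, p0 < p) (k : String) :
    pvHh d ((k0, p0) :: cs) (some (p0, d.getD k0 "")) k = some (p0, d.getD k0 "") := by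
  have h := pvHh_inv d k0 p0 cs hp (some (p0, d.getD k0 "")) k (Or.inr (Or.inr rfl))
  unfold pvHh at h ⊢
  rcases hl : List.lookup k ((k0, p0) :: cs) with _ | p
  · rfl
  · by_cases hv : d.getD k "" ≠ ""
    · simp only [if_pos hv]
      have hk : (k = k0 ∧ p = p0) ∨ List.lookup k cs = some p := by
        by_cases hkk : k = k0
        · simp only [List.lookup, show (k == k0) = true by simp [hkk]] at hl
          exact Or.inl ⟨hkk, (Option.some_inj.mp hl).symm⟩
        · simp only [List.lookup, show (k == k0) = false by simp [hkk]] at hl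
          exact Or.inr hl
      have hnp : ¬ p < p0 := by
        rcases hk with ⟨_, rfl⟩ | hmem
        · omega
        · have := hp p (pvLookup_mem_snd hmem); omega
      simp only [pvUpd, if_neg hnp]
    · simp only [if_neg hv]

theorem pvFoldl_inv (d : PySem.Dict String String) (k0 : String) (p0 : Int)
    (cs : List (String × Int)) (hp : ∀ p ∈ cs.map Prod.snd, p0 < p)
    (l : List String) (o : Option (Int × String)) (h : pvInv p0 (d.getD k0 "") o) :
    pvInv p0 (d.getD k0 "") (l.foldl (pvHh d ((k0, p0) :: cs)) o) := by
  induction l generalizing o with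
  | nil => exact h
  | cons a l ih => exact ih _ (pvHh_inv d k0 p0 cs hp o a h)

theorem pvFoldl_absorb (d : PySem.Dict String String) (k0 : String) (p0 : Int)
    (cs : List (String × Int)) (hp : ∀ p ∈ cs.map Prod.snd, p0 < p) (l : List String) :
    l.foldl (pvHh d ((k0, p0) :: cs)) (some (p0, d.getD k0 "")) = some (p0, d.getD k0 "") := by
  induction l with
  | nil => rfl
  | cons a l ih => rw [List.foldl_cons, pvHh_absorb d k0 p0 cs hp a, ih]

theorem pvMain (d : PySem.Dict String String) (keys : List String) :
    ∀ cs : List (String × Int),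
      (cs.map Prod.fst).Nodup →
      (cs.map Prod.snd).Pairwise (· < ·) →
      (∀ kp ∈ cs, d.getD kp.1 "" ≠ "" → kp.1 ∈ keys) →
      keys.foldl (pvHh d cs) none = pvFirst d cs := by
  intro cs
  induction cs generalizing keys with
  | nil =>
      intro _ _ _
      have : ∀ (l : List String) (o : Option (Int × String)), l.foldl (pvHh d []) o = o := by
        intro l
        induction l with
        | nil => exact fun _ => rfl
        | cons a l ih => intro o; rw [List.foldl_cons]; exact ih _
      exact this keys none
  | cons kp cs ih =>
      rcases kp with ⟨k0, p0⟩
      intro hnd hpw hcov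
      simp only [List.map_cons, List.pairwise_cons, List.nodup_cons] at hnd hpw
      have hp : ∀ p ∈ cs.map Prod.snd, p0 < p := fun p hm => by
        obtain ⟨kq, hkq, rfl⟩ := List.mem_map.mp hm
        exact hpw.1 _ (List.mem_map_of_mem hkq)
      by_cases t0 : d.getD k0 "" ≠ ""
      · obtain ⟨l1, l2, rfl⟩ := List.append_of_mem (hcov (k0, p0) List.mem_cons_self t0)
        rw [List.foldl_append, List.foldl_cons]
        rw [pvHh_head d k0 p0 cs t0 _
              (pvFoldl_inv d k0 p0 cs hp l1 none (Or.inl rfl)),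
            pvFoldl_absorb d k0 p0 cs hp l2]
        unfold pvFirst
        rw [if_pos t0]
      · have hk0 : List.lookup k0 cs = none := pvLookup_eq_none hnd.1
        have hfun : pvHh d ((k0, p0) :: cs) = pvHh d cs := by
          funext o k
          unfold pvHh
          by_cases hkk : k = k0
          · subst hkk
            simp only [List.lookup, beq_self_eq_true, hk0]
            rw [if_neg t0]
          · simp only [List.lookup, show (k == k0) = false by simp [hkk]]
        rw [hfun, ih keys hnd.2 hpw.2 (fun kq hq => hcov kq (List.mem_cons_of_mem _ hq))]
        exact (if_neg t0).symm

def csLocal : List (String × Int) := [("local_interface", 0), ("LOCAL_INTERFACE", 1)]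

def csNbrIf : List (String × Int) := [("neighbor_port_id", 0), ("neighbor_interface", 1), ("NEIGHBOR_PORT_ID", 2)]

def csHost : List (String × Int) := [("neighbor_name", 0), ("neighbor", 1), ("NEIGHBOR_NAME", 2)]

def csIp : List (String × Int) := [("management_ip", 0), ("MANAGEMENT_IP", 1)]

def csDesc : List (String × Int) := [("neighbor_description", 0), ("SYSTEM_DESCRIPTION", 1)]

def csChas : List (String × Int) := [("chassis_id", 0), ("CHASSIS_ID", 1)]

theorem pvHf_csLocal (d : PySem.Dict String String) (o : Option (Int × String)) (k : String) :
    pvHf d "local_interface" o k = pvHh d csLocal o k := by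
  by_cases h1 : k = "local_interface"
  · subst h1; simp [pvHf, pvHh, pvRevD, csLocal, PySem.Dict.get?_mk_cons]
  by_cases h2 : k = "LOCAL_INTERFACE"
  · subst h2; simp [pvHf, pvHh, pvRevD, csLocal, List.lookup, PySem.Dict.get?_mk_cons]
  by_cases h3 : k = "neighbor_port_id"
  · subst h3; simp [pvHf, pvHh, pvRevD, csLocal, List.lookup, PySem.Dict.get?_mk_cons]
  by_cases h4 : k = "neighbor_interface"
  · subst h4; simp [pvHf, pvHh, pvRevD, csLocal, List.lookup, PySem.Dict.get?_mk_cons]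
  by_cases h5 : k = "NEIGHBOR_PORT_ID"
  · subst h5; simp [pvHf, pvHh, pvRevD, csLocal, List.lookup, PySem.Dict.get?_mk_cons]
  by_cases h6 : k = "neighbor_name"
  · subst h6; simp [pvHf, pvHh, pvRevD, csLocal, List.lookup, PySem.Dict.get?_mk_cons]
  by_cases h7 : k = "neighbor"
  · subst h7; simp [pvHf, pvHh, pvRevD, csLocal, List.lookup, PySem.Dict.get?_mk_cons]
  by_cases h8 : k = "NEIGHBOR_NAME"
  · subst h8; simp [pvHf, pvHh, pvRevD, csLocal, List.lookup, PySem.Dict.get?_mk_cons]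
  by_cases h9 : k = "management_ip"
  · subst h9; simp [pvHf, pvHh, pvRevD, csLocal, List.lookup, PySem.Dict.get?_mk_cons]
  by_cases h10 : k = "MANAGEMENT_IP"
  · subst h10; simp [pvHf, pvHh, pvRevD, csLocal, List.lookup, PySem.Dict.get?_mk_cons]
  by_cases h11 : k = "neighbor_description"
  · subst h11; simp [pvHf, pvHh, pvRevD, csLocal, List.lookup, PySem.Dict.get?_mk_cons]
  by_cases h12 : k = "SYSTEM_DESCRIPTION"
  · subst h12; simp [pvHf, pvHh, pvRevD, csLocal, List.lookup, PySem.Dict.get?_mk_cons]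
  by_cases h13 : k = "chassis_id"
  · subst h13; simp [pvHf, pvHh, pvRevD, csLocal, List.lookup, PySem.Dict.get?_mk_cons]
  by_cases h14 : k = "CHASSIS_ID"
  · subst h14; simp [pvHf, pvHh, pvRevD, csLocal, List.lookup, PySem.Dict.get?_mk_cons]
  have hr : pvRevD.get? k = none := by
    rw [PySem.Dict.get?_eq_none_iff_not_mem_keys]
    simp [pvRevD, h1, h2, h3, h4, h5, h6, h7, h8, h9, h10, h11, h12, h13, h14]
  have hl : List.lookup k csLocal = none := pvLookup_eq_none (by simp [csLocal, h1, h2])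
  simp [pvHf, pvHh, hr, hl]

theorem pvHf_csNbrIf (d : PySem.Dict String String) (o : Option (Int × String)) (k : String) :
    pvHf d "neighbor_interface" o k = pvHh d csNbrIf o k := by
  by_cases h1 : k = "local_interface"
  · subst h1; simp [pvHf, pvHh, pvRevD, csNbrIf, List.lookup, PySem.Dict.get?_mk_cons]
  by_cases h2 : k = "LOCAL_INTERFACE"
  · subst h2; simp [pvHf, pvHh, pvRevD, csNbrIf, List.lookup, PySem.Dict.get?_mk_cons]
  by_cases h3 : k = "neighbor_port_id"
  · subst h3; simp [pvHf, pvHh, pvRevD, csNbrIf, PySem.Dict.get?_mk_cons]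
  by_cases h4 : k = "neighbor_interface"
  · subst h4; simp [pvHf, pvHh, pvRevD, csNbrIf, List.lookup, PySem.Dict.get?_mk_cons]
  by_cases h5 : k = "NEIGHBOR_PORT_ID"
  · subst h5; simp [pvHf, pvHh, pvRevD, csNbrIf, List.lookup, PySem.Dict.get?_mk_cons]
  by_cases h6 : k = "neighbor_name"
  · subst h6; simp [pvHf, pvHh, pvRevD, csNbrIf, List.lookup, PySem.Dict.get?_mk_cons]
  by_cases h7 : k = "neighbor"
  · subst h7; simp [pvHf, pvHh, pvRevD, csNbrIf, List.lookup, PySem.Dict.get?_mk_cons]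
  by_cases h8 : k = "NEIGHBOR_NAME"
  · subst h8; simp [pvHf, pvHh, pvRevD, csNbrIf, List.lookup, PySem.Dict.get?_mk_cons]
  by_cases h9 : k = "management_ip"
  · subst h9; simp [pvHf, pvHh, pvRevD, csNbrIf, List.lookup, PySem.Dict.get?_mk_cons]
  by_cases h10 : k = "MANAGEMENT_IP"
  · subst h10; simp [pvHf, pvHh, pvRevD, csNbrIf, List.lookup, PySem.Dict.get?_mk_cons]
  by_cases h11 : k = "neighbor_description"
  · subst h11; simp [pvHf, pvHh, pvRevD, csNbrIf, List.lookup, PySem.Dict.get?_mk_cons]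
  by_cases h12 : k = "SYSTEM_DESCRIPTION"
  · subst h12; simp [pvHf, pvHh, pvRevD, csNbrIf, List.lookup, PySem.Dict.get?_mk_cons]
  by_cases h13 : k = "chassis_id"
  · subst h13; simp [pvHf, pvHh, pvRevD, csNbrIf, List.lookup, PySem.Dict.get?_mk_cons]
  by_cases h14 : k = "CHASSIS_ID"
  · subst h14; simp [pvHf, pvHh, pvRevD, csNbrIf, List.lookup, PySem.Dict.get?_mk_cons]
  have hr : pvRevD.get? k = none := by
    rw [PySem.Dict.get?_eq_none_iff_not_mem_keys]
    simp [pvRevD, h1, h2, h3, h4, h5, h6, h7, h8, h9, h10, h11, h12, h13, h14]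
  have hl : List.lookup k csNbrIf = none := pvLookup_eq_none (by simp [csNbrIf, h3, h4, h5])
  simp [pvHf, pvHh, hr, hl]

theorem pvHf_csHost (d : PySem.Dict String String) (o : Option (Int × String)) (k : String) :
    pvHf d "neighbor_hostname" o k = pvHh d csHost o k := by
  by_cases h1 : k = "local_interface"
  · subst h1; simp [pvHf, pvHh, pvRevD, csHost, List.lookup, PySem.Dict.get?_mk_cons]
  by_cases h2 : k = "LOCAL_INTERFACE"
  · subst h2; simp [pvHf, pvHh, pvRevD, csHost, List.lookup, PySem.Dict.get?_mk_cons]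
  by_cases h3 : k = "neighbor_port_id"
  · subst h3; simp [pvHf, pvHh, pvRevD, csHost, List.lookup, PySem.Dict.get?_mk_cons]
  by_cases h4 : k = "neighbor_interface"
  · subst h4; simp [pvHf, pvHh, pvRevD, csHost, List.lookup, PySem.Dict.get?_mk_cons]
  by_cases h5 : k = "NEIGHBOR_PORT_ID"
  · subst h5; simp [pvHf, pvHh, pvRevD, csHost, List.lookup, PySem.Dict.get?_mk_cons]
  by_cases h6 : k = "neighbor_name"
  · subst h6; simp [pvHf, pvHh, pvRevD, csHost, PySem.Dict.get?_mk_cons]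
  by_cases h7 : k = "neighbor"
  · subst h7; simp [pvHf, pvHh, pvRevD, csHost, List.lookup, PySem.Dict.get?_mk_cons]
  by_cases h8 : k = "NEIGHBOR_NAME"
  · subst h8; simp [pvHf, pvHh, pvRevD, csHost, List.lookup, PySem.Dict.get?_mk_cons]
  by_cases h9 : k = "management_ip"
  · subst h9; simp [pvHf, pvHh, pvRevD, csHost, List.lookup, PySem.Dict.get?_mk_cons]
  by_cases h10 : k = "MANAGEMENT_IP"
  · subst h10; simp [pvHf, pvHh, pvRevD, csHost, List.lookup, PySem.Dict.get?_mk_cons]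
  by_cases h11 : k = "neighbor_description"
  · subst h11; simp [pvHf, pvHh, pvRevD, csHost, List.lookup, PySem.Dict.get?_mk_cons]
  by_cases h12 : k = "SYSTEM_DESCRIPTION"
  · subst h12; simp [pvHf, pvHh, pvRevD, csHost, List.lookup, PySem.Dict.get?_mk_cons]
  by_cases h13 : k = "chassis_id"
  · subst h13; simp [pvHf, pvHh, pvRevD, csHost, List.lookup, PySem.Dict.get?_mk_cons]
  by_cases h14 : k = "CHASSIS_ID"
  · subst h14; simp [pvHf, pvHh, pvRevD, csHost, List.lookup, PySem.Dict.get?_mk_cons]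
  have hr : pvRevD.get? k = none := by
    rw [PySem.Dict.get?_eq_none_iff_not_mem_keys]
    simp [pvRevD, h1, h2, h3, h4, h5, h6, h7, h8, h9, h10, h11, h12, h13, h14]
  have hl : List.lookup k csHost = none := pvLookup_eq_none (by simp [csHost, h6, h7, h8])
  simp [pvHf, pvHh, hr, hl]

theorem pvHf_csIp (d : PySem.Dict String String) (o : Option (Int × String)) (k : String) :
    pvHf d "neighbor_ip" o k = pvHh d csIp o k := by
  by_cases h1 : k = "local_interface"
  · subst h1; simp [pvHf, pvHh, pvRevD, csIp, List.lookup, PySem.Dict.get?_mk_cons]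
  by_cases h2 : k = "LOCAL_INTERFACE"
  · subst h2; simp [pvHf, pvHh, pvRevD, csIp, List.lookup, PySem.Dict.get?_mk_cons]
  by_cases h3 : k = "neighbor_port_id"
  · subst h3; simp [pvHf, pvHh, pvRevD, csIp, List.lookup, PySem.Dict.get?_mk_cons]
  by_cases h4 : k = "neighbor_interface"
  · subst h4; simp [pvHf, pvHh, pvRevD, csIp, List.lookup, PySem.Dict.get?_mk_cons]
  by_cases h5 : k = "NEIGHBOR_PORT_ID"
  · subst h5; simp [pvHf, pvHh, pvRevD, csIp, List.lookup, PySem.Dict.get?_mk_cons]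
  by_cases h6 : k = "neighbor_name"
  · subst h6; simp [pvHf, pvHh, pvRevD, csIp, List.lookup, PySem.Dict.get?_mk_cons]
  by_cases h7 : k = "neighbor"
  · subst h7; simp [pvHf, pvHh, pvRevD, csIp, List.lookup, PySem.Dict.get?_mk_cons]
  by_cases h8 : k = "NEIGHBOR_NAME"
  · subst h8; simp [pvHf, pvHh, pvRevD, csIp, List.lookup, PySem.Dict.get?_mk_cons]
  by_cases h9 : k = "management_ip"
  · subst h9; simp [pvHf, pvHh, pvRevD, csIp, PySem.Dict.get?_mk_cons]
  by_cases h10 : k = "MANAGEMENT_IP"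
  · subst h10; simp [pvHf, pvHh, pvRevD, csIp, List.lookup, PySem.Dict.get?_mk_cons]
  by_cases h11 : k = "neighbor_description"
  · subst h11; simp [pvHf, pvHh, pvRevD, csIp, List.lookup, PySem.Dict.get?_mk_cons]
  by_cases h12 : k = "SYSTEM_DESCRIPTION"
  · subst h12; simp [pvHf, pvHh, pvRevD, csIp, List.lookup, PySem.Dict.get?_mk_cons]
  by_cases h13 : k = "chassis_id"
  · subst h13; simp [pvHf, pvHh, pvRevD, csIp, List.lookup, PySem.Dict.get?_mk_cons]
  by_cases h14 : k = "CHASSIS_ID"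
  · subst h14; simp [pvHf, pvHh, pvRevD, csIp, List.lookup, PySem.Dict.get?_mk_cons]
  have hr : pvRevD.get? k = none := by
    rw [PySem.Dict.get?_eq_none_iff_not_mem_keys]
    simp [pvRevD, h1, h2, h3, h4, h5, h6, h7, h8, h9, h10, h11, h12, h13, h14]
  have hl : List.lookup k csIp = none := pvLookup_eq_none (by simp [csIp, h9, h10])
  simp [pvHf, pvHh, hr, hl]

theorem pvHf_csDesc (d : PySem.Dict String String) (o : Option (Int × String)) (k : String) :
    pvHf d "neighbor_description" o k = pvHh d csDesc o k := by
  by_cases h1 : k = "local_interface"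
  · subst h1; simp [pvHf, pvHh, pvRevD, csDesc, List.lookup, PySem.Dict.get?_mk_cons]
  by_cases h2 : k = "LOCAL_INTERFACE"
  · subst h2; simp [pvHf, pvHh, pvRevD, csDesc, List.lookup, PySem.Dict.get?_mk_cons]
  by_cases h3 : k = "neighbor_port_id"
  · subst h3; simp [pvHf, pvHh, pvRevD, csDesc, List.lookup, PySem.Dict.get?_mk_cons]
  by_cases h4 : k = "neighbor_interface"
  · subst h4; simp [pvHf, pvHh, pvRevD, csDesc, List.lookup, PySem.Dict.get?_mk_cons]
  by_cases h5 : k = "NEIGHBOR_PORT_ID"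
  · subst h5; simp [pvHf, pvHh, pvRevD, csDesc, List.lookup, PySem.Dict.get?_mk_cons]
  by_cases h6 : k = "neighbor_name"
  · subst h6; simp [pvHf, pvHh, pvRevD, csDesc, List.lookup, PySem.Dict.get?_mk_cons]
  by_cases h7 : k = "neighbor"
  · subst h7; simp [pvHf, pvHh, pvRevD, csDesc, List.lookup, PySem.Dict.get?_mk_cons]
  by_cases h8 : k = "NEIGHBOR_NAME"
  · subst h8; simp [pvHf, pvHh, pvRevD, csDesc, List.lookup, PySem.Dict.get?_mk_cons]
  by_cases h9 : k = "management_ip"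
  · subst h9; simp [pvHf, pvHh, pvRevD, csDesc, List.lookup, PySem.Dict.get?_mk_cons]
  by_cases h10 : k = "MANAGEMENT_IP"
  · subst h10; simp [pvHf, pvHh, pvRevD, csDesc, List.lookup, PySem.Dict.get?_mk_cons]
  by_cases h11 : k = "neighbor_description"
  · subst h11; simp [pvHf, pvHh, pvRevD, csDesc, PySem.Dict.get?_mk_cons]
  by_cases h12 : k = "SYSTEM_DESCRIPTION"
  · subst h12; simp [pvHf, pvHh, pvRevD, csDesc, List.lookup, PySem.Dict.get?_mk_cons]
  by_cases h13 : k = "chassis_id"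
  · subst h13; simp [pvHf, pvHh, pvRevD, csDesc, List.lookup, PySem.Dict.get?_mk_cons]
  by_cases h14 : k = "CHASSIS_ID"
  · subst h14; simp [pvHf, pvHh, pvRevD, csDesc, List.lookup, PySem.Dict.get?_mk_cons]
  have hr : pvRevD.get? k = none := by
    rw [PySem.Dict.get?_eq_none_iff_not_mem_keys]
    simp [pvRevD, h1, h2, h3, h4, h5, h6, h7, h8, h9, h10, h11, h12, h13, h14]
  have hl : List.lookup k csDesc = none := pvLookup_eq_none (by simp [csDesc, h11, h12])
  simp [pvHf, pvHh, hr, hl]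

theorem pvHf_csChas (d : PySem.Dict String String) (o : Option (Int × String)) (k : String) :
    pvHf d "chassis_id" o k = pvHh d csChas o k := by
  by_cases h1 : k = "local_interface"
  · subst h1; simp [pvHf, pvHh, pvRevD, csChas, List.lookup, PySem.Dict.get?_mk_cons]
  by_cases h2 : k = "LOCAL_INTERFACE"
  · subst h2; simp [pvHf, pvHh, pvRevD, csChas, List.lookup, PySem.Dict.get?_mk_cons]
  by_cases h3 : k = "neighbor_port_id"
  · subst h3; simp [pvHf, pvHh, pvRevD, csChas, List.lookup, PySem.Dict.get?_mk_cons]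
  by_cases h4 : k = "neighbor_interface"
  · subst h4; simp [pvHf, pvHh, pvRevD, csChas, List.lookup, PySem.Dict.get?_mk_cons]
  by_cases h5 : k = "NEIGHBOR_PORT_ID"
  · subst h5; simp [pvHf, pvHh, pvRevD, csChas, List.lookup, PySem.Dict.get?_mk_cons]
  by_cases h6 : k = "neighbor_name"
  · subst h6; simp [pvHf, pvHh, pvRevD, csChas, List.lookup, PySem.Dict.get?_mk_cons]
  by_cases h7 : k = "neighbor"
  · subst h7; simp [pvHf, pvHh, pvRevD, csChas, List.lookup, PySem.Dict.get?_mk_cons]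
  by_cases h8 : k = "NEIGHBOR_NAME"
  · subst h8; simp [pvHf, pvHh, pvRevD, csChas, List.lookup, PySem.Dict.get?_mk_cons]
  by_cases h9 : k = "management_ip"
  · subst h9; simp [pvHf, pvHh, pvRevD, csChas, List.lookup, PySem.Dict.get?_mk_cons]
  by_cases h10 : k = "MANAGEMENT_IP"
  · subst h10; simp [pvHf, pvHh, pvRevD, csChas, List.lookup, PySem.Dict.get?_mk_cons]
  by_cases h11 : k = "neighbor_description"
  · subst h11; simp [pvHf, pvHh, pvRevD, csChas, List.lookup, PySem.Dict.get?_mk_cons]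
  by_cases h12 : k = "SYSTEM_DESCRIPTION"
  · subst h12; simp [pvHf, pvHh, pvRevD, csChas, List.lookup, PySem.Dict.get?_mk_cons]
  by_cases h13 : k = "chassis_id"
  · subst h13; simp [pvHf, pvHh, pvRevD, csChas, PySem.Dict.get?_mk_cons]
  by_cases h14 : k = "CHASSIS_ID"
  · subst h14; simp [pvHf, pvHh, pvRevD, csChas, List.lookup, PySem.Dict.get?_mk_cons]
  have hr : pvRevD.get? k = none := by
    rw [PySem.Dict.get?_eq_none_iff_not_mem_keys]
    simp [pvRevD, h1, h2, h3, h4, h5, h6, h7, h8, h9, h10, h11, h12, h13, h14]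
  have hl : List.lookup k csChas = none := pvLookup_eq_none (by simp [csChas, h13, h14])
  simp [pvHf, pvHh, hr, hl]

-- a truthy dict value means the key occurs in the entry
theorem pvCov (e : List (String × String)) (k : String)
    (h : (PySem.Dict.mk e).getD k "" ≠ "") : k ∈ PySem.List.dedup (e.map Prod.fst) := by
  rw [PySem.List.mem_dedup]
  by_contra hn
  apply h
  apply PySem.Dict.getD_of_not_contains
  have hmem : ¬ ((PySem.Dict.mk e).contains k = true) := by
    rw [PySem.Dict.contains_iff_mem_keys]
    simpa [PySem.Dict.keys_mk] using hn
  exact Bool.not_eq_true _ |>.mp hmem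

-- the slot of one output field after B's single pass, as the first-truthy candidate
theorem pvSlot (e : List (String × String)) (f : String) (cs : List (String × Int))
    (heq : ∀ o k, pvHf (PySem.Dict.mk e) f o k = pvHh (PySem.Dict.mk e) cs o k)
    (hnd : (cs.map Prod.fst).Nodup) (hpw : (cs.map Prod.snd).Pairwise (· < ·)) :
    ((pvItems e).foldl pvStep PySem.Dict.empty).get? f = pvFirst (PySem.Dict.mk e) cs := by
  have hfold : (pvItems e).foldl pvStep PySem.Dict.empty
      = (PySem.List.dedup (e.map Prod.fst)).foldl
          (fun b k => pvStep b (k, (PySem.Dict.mk e).getD k "")) PySem.Dict.empty := by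
    unfold pvItems; rw [List.foldl_map]
  rw [hfold, foldl_pvStep_get, PySem.Dict.get?_empty]
  rw [show pvHf (PySem.Dict.mk e) f = pvHh (PySem.Dict.mk e) cs from
        funext fun o => funext fun k => heq o k]
  exact pvMain _ _ cs hnd hpw (fun kp _ h => pvCov e kp.1 h)

theorem pvOr_eq_getD (d : PySem.Dict String String) (k : String) (b : String) :
    pvOr (d.get? k) b = (if d.getD k "" = "" then b else d.getD k "") := by
  rw [PySem.Dict.getD_eq_get?_getD]
  cases d.get? k with
  | none => simp [pvOr]
  | some s => by_cases h : s = "" <;> simp [pvOr, h]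

theorem pvChain2 (d : PySem.Dict String String) (k0 k1 : String) (p0 p1 : Int) :
    pvOr (d.get? k0) (d.getD k1 "")
      = (match pvFirst d [(k0, p0), (k1, p1)] with | some q => q.2 | none => "") := by
  by_cases h0 : d.getD k0 "" = "" <;> by_cases h1 : d.getD k1 "" = "" <;>
    simp [pvOr_eq_getD, pvFirst, h0, h1]

theorem pvChain3 (d : PySem.Dict String String) (k0 k1 k2 : String) (p0 p1 p2 : Int) :
    pvOr (d.get? k0) (pvOr (d.get? k1) (d.getD k2 ""))
      = (match pvFirst d [(k0, p0), (k1, p1), (k2, p2)] with | some q => q.2 | none => "") := by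
  by_cases h0 : d.getD k0 "" = "" <;> by_cases h1 : d.getD k1 "" = "" <;>
    by_cases h2 : d.getD k2 "" = "" <;> simp [pvOr_eq_getD, pvFirst, h0, h1, h2]

theorem pvEntry_eq (e : List (String × String)) : pvEntryA e = pvEntryB e := by
  unfold pvEntryA pvEntryB pvFields
  simp only [List.map_cons, List.map_nil]
  rw [pvSlot e _ csLocal (pvHf_csLocal _) (by decide) (by decide),
      pvSlot e _ csNbrIf (pvHf_csNbrIf _) (by decide) (by decide),
      pvSlot e _ csHost (pvHf_csHost _) (by decide) (by decide),
      pvSlot e _ csIp (pvHf_csIp _) (by decide) (by decide),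
      pvSlot e _ csDesc (pvHf_csDesc _) (by decide) (by decide),
      pvSlot e _ csChas (pvHf_csChas _) (by decide) (by decide),
      pvChain2 _ _ _ (0 : Int) 1, pvChain3 _ _ _ _ (0 : Int) 1 2,
      pvChain3 _ _ _ _ (0 : Int) 1 2, pvChain2 _ _ _ (0 : Int) 1,
      pvChain2 _ _ _ (0 : Int) 1, pvChain2 _ _ _ (0 : Int) 1]
  simp only [csLocal, csNbrIf, csHost, csIp, csDesc, csChas]

-- ===== VERDICT (by name: the statement is the Claim_ definition above) =====
theorem parse_lldp_result_py_spec : Claim_equal_parse_lldp_result_py := by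
  intro lldp_data _
  unfold Spec_parse_lldp_result_py parse_lldp_result_py parse_lldp_result_py_alt
  have h : pvEntryA = pvEntryB := funext pvEntry_eq
  rw [h]
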